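-- pv_equiv track=rewrite | github.com/openai/parameter-golf | HDC_Core_Model/Templates_Tools/grid_templates.py | align_to_edge
-- ===== SOURCE A (Python) =====
-- from typing import List, Dict, Tuple, Optional, Any, Callable
-- from copy import deepcopy
--
-- Grid = List[List[int]]
--
-- def translate_grid(grid: Grid, dy: int, dx: int, wrap: bool = False) -> Grid:
--     """
--     Translate entire grid contents by (dy, dx).
--
--     Args:
--         grid: Input grid
--         dy: Vertical shift (positive = down)
--         dx: Horizontal shift (positive = right)
--         wrap: If True, wrap around edges; if False, cells shift out are lost
--
--     Returns:
--         Translated grid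
--     """
--     if not grid or not grid[0]:
--         return grid
--
--     height, width = len(grid), len(grid[0])
--     result = [[0] * width for _ in range(height)]
--
--     for y in range(height):
--         for x in range(width):
--             if grid[y][x] != 0:
--                 new_y = y + dy
--                 new_x = x + dx
--
--                 if wrap:
--                     new_y = new_y % height
--                     new_x = new_x % width
--
--                 if 0 <= new_y < height and 0 <= new_x < width:
--                     result[new_y][new_x] = grid[y][x]
--
--     return result
--
-- def align_to_edge(grid: Grid, edge: str = 'top') -> Grid:
--     """
--     Align object(s) to a specific edge.
--
--     Args:
--         edge: 'top', 'bottom', 'left', 'right'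
--     """
--     if not grid or not grid[0]:
--         return grid
--
--     height, width = len(grid), len(grid[0])
--
--     # Find bounding box
--     min_y, min_x = height, width
--     max_y, max_x = 0, 0
--
--     for y in range(height):
--         for x in range(width):
--             if grid[y][x] != 0:
--                 min_y = min(min_y, y)
--                 max_y = max(max_y, y)
--                 min_x = min(min_x, x)
--                 max_x = max(max_x, x)
--
--     if min_y > max_y:
--         return deepcopy(grid)
--
--     # Calculate translation based on edge
--     if edge == 'top':
--         dy, dx = -min_y, 0
--     elif edge == 'bottom':
--         dy, dx = (height - 1 - max_y), 0
--     elif edge == 'left':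
--         dy, dx = 0, -min_x
--     elif edge == 'right':
--         dy, dx = 0, (width - 1 - max_x)
--     else:
--         return deepcopy(grid)
--
--     return translate_grid(grid, dy, dx)
-- ===== SOURCE B (Python) =====
-- def align_to_edge(grid, edge='top'):
--     if not grid or not grid[0]:
--         return grid
--     h, w = len(grid), len(grid[0])
--     rows = [row[:w] for row in grid]
--     if edge in ('top', 'bottom'):
--         ys = [y for y, r in enumerate(rows) if any(v != 0 for v in r)]
--         if not ys:
--             return [row[:] for row in grid]
--         if edge == 'top':
--             k = ys[0]
--             return rows[k:] + [[0] * w for _ in range(k)]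
--         k = h - 1 - ys[-1]
--         return [[0] * w for _ in range(k)] + rows[:h - k]
--     if edge in ('left', 'right'):
--         xs = [x for r in rows for x, v in enumerate(r) if v != 0]
--         if not xs:
--             return [row[:] for row in grid]
--         if edge == 'left':
--             d = min(xs)
--             return [r[d:] + [0] * d for r in rows]
--         d = w - 1 - max(xs)
--         return [[0] * d + r[:w - d] for r in rows]
--     return [row[:] for row in grid]
-- ===== Notes on version B (the rewrite author's own statement) =====
-- stated objective: alternative
-- what changed: B replaces A's full bounding-box scan plus cell-by-cell translate_grid with a per-edge extreme scan (first/last nonzero row, min/max nonzero column) and builds the output by whole-row/column slicing and zero padding.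
import Mathlib
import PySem

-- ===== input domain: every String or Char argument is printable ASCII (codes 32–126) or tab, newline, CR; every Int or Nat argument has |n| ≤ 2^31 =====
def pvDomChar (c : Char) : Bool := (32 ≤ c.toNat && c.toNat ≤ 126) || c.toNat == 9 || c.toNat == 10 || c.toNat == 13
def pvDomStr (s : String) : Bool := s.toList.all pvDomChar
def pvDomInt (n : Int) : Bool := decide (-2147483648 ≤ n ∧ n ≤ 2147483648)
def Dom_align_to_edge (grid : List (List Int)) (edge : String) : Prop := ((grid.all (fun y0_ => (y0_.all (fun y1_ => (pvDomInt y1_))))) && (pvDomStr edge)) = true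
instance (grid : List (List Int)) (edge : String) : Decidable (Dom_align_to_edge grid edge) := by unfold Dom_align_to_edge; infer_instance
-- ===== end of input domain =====

-- B aligns the nonzero object by scanning only for the per-edge extreme (first/last nonzero
-- row, min/max nonzero column) and builds the result by slicing whole rows/columns and padding
-- with zeros, instead of A's full bounding-box scan followed by cell-by-cell translate_grid.


-- ===== PORT A =====
-- grid[y][x] for the loop indices; the default is never taken on inputs admitted by Pre_
-- (where Python would raise IndexError, pyGetD's default is reached — those inputs are outside Pre_).
def pyCell (grid : List (List Int)) (y x : Int) : Int :=
  PySem.List.pyGetD (PySem.List.pyGetD grid y []) x 0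

-- literal port of translate_grid for the wrap=False path A uses (A always calls it with the default wrap)
def translate_grid (grid : List (List Int)) (dy dx : Int) : List (List Int) :=
  match grid with
  | [] => grid
  | row0 :: _ =>
    if row0 = [] then grid else
    let height := grid.length
    let width := row0.length
    let init : List (List Int) := List.replicate height (List.replicate width 0)
    (PySem.List.pyRange 0 (height : Int) 1).foldl (fun res y =>
      (PySem.List.pyRange 0 (width : Int) 1).foldl (fun res x =>
        if pyCell grid y x ≠ 0 then
          let ny := y + dy
          let nx := x + dx
          if 0 ≤ ny ∧ ny < (height : Int) ∧ 0 ≤ nx ∧ nx < (width : Int) then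
            res.set ny.toNat ((res.getD ny.toNat []).set nx.toNat (pyCell grid y x))
          else res
        else res) res) init

def align_to_edge (grid : List (List Int)) (edge : String) : List (List Int) :=
  match grid with
  | [] => grid
  | row0 :: _ =>
    if row0 = [] then grid else
    let height := grid.length
    let width := row0.length
    -- bounding box: (min_y, max_y, min_x, max_x), initialised to (height, 0, width, 0)
    let bb : Int × Int × Int × Int :=
      (PySem.List.pyRange 0 (height : Int) 1).foldl (fun acc y =>
        (PySem.List.pyRange 0 (width : Int) 1).foldl (fun acc x =>
          if pyCell grid y x ≠ 0 then
            (min acc.1 y, max acc.2.1 y, min acc.2.2.1 x, max acc.2.2.2 x)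
          else acc) acc)
        ((height : Int), 0, (width : Int), 0)
    if bb.1 > bb.2.1 then grid          -- deepcopy(grid): value-equal copy
    else if edge = "top" then translate_grid grid (-bb.1) 0
    else if edge = "bottom" then translate_grid grid ((height : Int) - 1 - bb.2.1) 0
    else if edge = "left" then translate_grid grid 0 (-bb.2.2.1)
    else if edge = "right" then translate_grid grid 0 ((width : Int) - 1 - bb.2.2.2)
    else grid                            -- deepcopy(grid)

-- ===== PORT B =====
def align_to_edge_alt (grid : List (List Int)) (edge : String) : List (List Int) :=
  match grid with
  | [] => grid
  | row0 :: _ =>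
    if row0 = [] then grid else
    let h := grid.length
    let w := row0.length
    let rows := grid.map (fun r => r.take w)   -- row[:w]
    if edge = "top" ∨ edge = "bottom" then
      let ys := (PySem.List.enumerate rows 0).filterMap
        (fun p => if p.2.any (fun v => v ≠ 0) then some p.1 else none)
      match ys with
      | [] => grid.map (fun r => r)            -- [row[:] for row in grid]
      | y0 :: ytl =>
        if edge = "top" then
          rows.drop y0.toNat ++ List.replicate y0.toNat (List.replicate w 0)
        else
          let k := ((h : Int) - 1 - (y0 :: ytl).getLast (by simp)).toNat
          List.replicate k (List.replicate w 0) ++ rows.take (h - k)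
    else if edge = "left" ∨ edge = "right" then
      let xs := rows.flatMap (fun r =>
        (PySem.List.enumerate r 0).filterMap (fun p => if p.2 ≠ 0 then some p.1 else none))
      match xs with
      | [] => grid.map (fun r => r)            -- [row[:] for row in grid]
      | x0 :: xtl =>
        if edge = "left" then
          let d := (xtl.foldl min x0).toNat    -- min(xs)
          rows.map (fun r => r.drop d ++ List.replicate d 0)
        else
          let d := ((w : Int) - 1 - xtl.foldl max x0).toNat   -- w - 1 - max(xs)
          rows.map (fun r => List.replicate d 0 ++ r.take (w - d))
    else grid.map (fun r => r)                 -- [row[:] for row in grid]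

-- ===== PRECONDITION & SPEC =====
-- Pre_ excludes exactly the grids on which the Python A raises IndexError: a nonempty grid with
-- nonempty first row in which some row is shorter than the first row.
def Pre_align_to_edge (grid : List (List Int)) (edge : String) : Prop :=
  ∀ r ∈ grid, (grid.headD []).length ≤ r.length
instance (grid : List (List Int)) (edge : String) : Decidable (Pre_align_to_edge grid edge) := by
  unfold Pre_align_to_edge; infer_instance

def pvWitness_align_to_edge : List (List Int) × String := ([[0, 1], [2, 0]], "top")

def Spec_align_to_edge (grid : List (List Int)) (edge : String) (out : List (List Int)) : Prop := out = align_to_edge_alt grid edge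
instance (grid : List (List Int)) (edge : String) (out : List (List Int)) : Decidable (Spec_align_to_edge grid edge out) := by unfold Spec_align_to_edge; infer_instance

-- ===== CLAIM (what is proved, stated in full; the proofs are below) =====
def Claim_equal_align_to_edge : Prop := ∀ (grid : List (List Int)) (edge : String), Dom_align_to_edge grid edge → Pre_align_to_edge grid edge → Spec_align_to_edge grid edge (align_to_edge grid edge)


-- ===== LEMMAS AND PROOFS =====

/-- `grid[y][x]` with Nat indices (total; defaults never reached for in-range indices). -/
def cellN (g : List (List Int)) (y x : Nat) : Int := (g.getD y []).getD x 0

/-- zero row of width `w` -/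
def zrow (w : Nat) : List Int := List.replicate w (0 : Int)

/-- B's `rows`: every row truncated to the width of the first row. -/
def rowsB (g : List (List Int)) (w : Nat) : List (List Int) := g.map (fun r => r.take w)

/-- row `y` of the grid translated horizontally by `dx` on a width-`w` canvas. -/
def trRow (g : List (List Int)) (w : Nat) (dx : Int) (y : Nat) : List Int :=
  (List.range w).map (fun (j : Nat) => if 0 ≤ (j : Int) - dx ∧ (j : Int) - dx < (w : Int)
    then cellN g y ((j : Int) - dx).toNat else 0)

/-- the whole grid translated by `(dy, dx)` on an `h × w` canvas. -/
def trGrid (g : List (List Int)) (h w : Nat) (dy dx : Int) : List (List Int) :=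
  (List.range h).map (fun (i : Nat) => if 0 ≤ (i : Int) - dy ∧ (i : Int) - dy < (h : Int)
    then trRow g w dx (((i : Int) - dy).toNat) else zrow w)

/-- `y` is a row of `g` containing a nonzero cell among the first `w` columns. -/
def rowNZ (g : List (List Int)) (w y : Nat) : Bool := (List.range w).any (fun x => cellN g y x ≠ 0)

/-- indices of nonzero rows, ascending. -/
def ysN (g : List (List Int)) (h w : Nat) : List Nat := (List.range h).filter (rowNZ g w)

/-- column indices of nonzero cells, row-major (with multiplicity). -/
def xsN (g : List (List Int)) (h w : Nat) : List Nat :=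
  (List.range h).flatMap (fun y => (List.range w).filter (fun x => cellN g y x ≠ 0))

theorem pyRange_natCast (n : Nat) :
    PySem.List.pyRange 0 (n : Int) 1 = (List.range n).map (fun (k : Nat) => (k : Int)) := by
  rw [PySem.List.pyRange_one]
  simp only [Int.sub_zero, Int.toNat_natCast]
  exact List.map_congr_left (fun a _ => by simp)

theorem pyCell_natCast (g : List (List Int)) (y x : Nat) :
    pyCell g (y : Int) (x : Int) = cellN g y x := by
  simp [pyCell, cellN, PySem.List.pyGetD_natCast]

theorem foldl_min_ge (L : List Int) (a : Int) (h : ∀ z ∈ L, a ≤ z) :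
    L.foldl min a = a := by
  induction L with
  | nil => rfl
  | cons x t ih =>
    have hx : a ≤ x := h x (by simp)
    simp only [List.foldl_cons, min_eq_left hx]
    exact ih (fun z hz => h z (by simp [hz]))

theorem foldl_min_le (L : List Int) (a : Int) : L.foldl min a ≤ a := by
  induction L generalizing a with
  | nil => exact le_refl a
  | cons x t ih => exact le_trans (ih (min a x)) (min_le_left a x)

theorem foldl_min_init (L : List Int) (c d : Int) :
    L.foldl min (min c d) = min c (L.foldl min d) := by
  induction L generalizing d with
  | nil => rfl
  | cons x t ih => simp only [List.foldl_cons, min_assoc, ih]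

theorem foldl_max_init (L : List Int) (c d : Int) :
    L.foldl max (max c d) = max c (L.foldl max d) := by
  induction L generalizing d with
  | nil => rfl
  | cons x t ih => simp only [List.foldl_cons, max_assoc, ih]

theorem foldl_max_le_of (L : List Int) (a M : Int) (ha : a ≤ M) (h : ∀ z ∈ L, z ≤ M) :
    L.foldl max a ≤ M := by
  induction L generalizing a with
  | nil => exact ha
  | cons x t ih =>
    exact ih (max a x) (max_le ha (h x (by simp))) (fun z hz => h z (by simp [hz]))

theorem filterMap_ite {α β : Type} (L : List α) (p : α → Prop) [DecidablePred p] (f : α → β) :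
    L.filterMap (fun x => if p x then some (f x) else none)
    = (L.filter (fun x => decide (p x))).map f := by
  induction L with
  | nil => rfl
  | cons x t ih => by_cases hp : p x <;> simp [hp, ih]



def minyA (g : List (List Int)) (h w : Nat) : Int := (ysN g h w).foldl (fun a (y : Nat) => min a (y : Int)) (h : Int)
def maxyA (g : List (List Int)) (h w : Nat) : Int := (ysN g h w).foldl (fun a (y : Nat) => max a (y : Int)) 0
def minxA (g : List (List Int)) (h w : Nat) : Int := (xsN g h w).foldl (fun a (x : Nat) => min a (x : Int)) (w : Int)
def maxxA (g : List (List Int)) (h w : Nat) : Int := (xsN g h w).foldl (fun a (x : Nat) => max a (x : Int)) 0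

theorem inner_bb_gen {α : Type} (p : α → Prop) [DecidablePred p] (yv : Int) (fx : α → Int)
    (L : List α) (acc : Int × Int × Int × Int) :
    L.foldl (fun acc x => if p x then
        (min acc.1 yv, max acc.2.1 yv, min acc.2.2.1 (fx x), max acc.2.2.2 (fx x))
      else acc) acc
    = (if L.any (fun x => decide (p x)) then min acc.1 yv else acc.1,
       if L.any (fun x => decide (p x)) then max acc.2.1 yv else acc.2.1,
       (L.filter (fun x => decide (p x))).foldl (fun a x => min a (fx x)) acc.2.2.1,
       (L.filter (fun x => decide (p x))).foldl (fun a x => max a (fx x)) acc.2.2.2) := by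
  induction L generalizing acc with
  | nil => simp
  | cons x t ih =>
    simp only [List.foldl_cons, List.any_cons, List.filter_cons]
    by_cases hc : p x
    · rw [if_pos hc, ih]
      simp only [hc, decide_true, Bool.true_or, if_true, List.foldl_cons]
      by_cases ht : t.any (fun x => decide (p x)) = true <;>
        simp [ht, min_assoc, max_assoc]
    · rw [if_neg hc, ih]
      simp [hc]

theorem outer_bb_gen (g : List (List Int)) (w : Nat) (L : List Nat) (acc : Int × Int × Int × Int) :
    L.foldl (fun acc y => (List.range w).foldl (fun acc x => if cellN g y x ≠ 0 then
        (min acc.1 (y : Int), max acc.2.1 (y : Int), min acc.2.2.1 (x : Int), max acc.2.2.2 (x : Int))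
      else acc) acc) acc
    = ((L.filter (rowNZ g w)).foldl (fun a (y : Nat) => min a (y : Int)) acc.1,
       (L.filter (rowNZ g w)).foldl (fun a (y : Nat) => max a (y : Int)) acc.2.1,
       (L.flatMap (fun y => (List.range w).filter (fun x => decide (cellN g y x ≠ 0)))).foldl
         (fun a (x : Nat) => min a (x : Int)) acc.2.2.1,
       (L.flatMap (fun y => (List.range w).filter (fun x => decide (cellN g y x ≠ 0)))).foldl
         (fun a (x : Nat) => max a (x : Int)) acc.2.2.2) := by
  induction L generalizing acc with
  | nil => simp
  | cons y t ih =>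
    simp only [List.foldl_cons]
    rw [inner_bb_gen (fun x => cellN g y x ≠ 0) (y : Int) (fun (x : Nat) => (x : Int))]
    have hr : ((List.range w).any fun x => decide (cellN g y x ≠ 0)) = rowNZ g w y := rfl
    rw [hr, ih]
    simp only [List.filter_cons, List.flatMap_cons, List.foldl_append]
    by_cases hy : rowNZ g w y = true <;> simp [hy]

theorem bb_fold_eq (g : List (List Int)) (h w : Nat) :
    ((PySem.List.pyRange 0 (h : Int) 1).foldl (fun acc y =>
      (PySem.List.pyRange 0 (w : Int) 1).foldl (fun (acc : Int × Int × Int × Int) x =>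
        if pyCell g y x ≠ 0 then
          (min acc.1 y, max acc.2.1 y, min acc.2.2.1 x, max acc.2.2.2 x)
        else acc) acc) ((h : Int), 0, (w : Int), 0))
    = (minyA g h w, maxyA g h w, minxA g h w, maxxA g h w) := by
  simp only [pyRange_natCast, List.foldl_map, pyCell_natCast]
  rw [outer_bb_gen]
  rfl

theorem mem_ysN_lt (g : List (List Int)) (h w y : Nat) (hy : y ∈ ysN g h w) : y < h :=
  List.mem_range.mp (List.mem_of_mem_filter hy)

theorem mem_xsN_lt (g : List (List Int)) (h w x : Nat) (hx : x ∈ xsN g h w) : x < w := by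
  rcases List.mem_flatMap.mp hx with ⟨y, _, hmem⟩
  exact List.mem_range.mp (List.mem_of_mem_filter hmem)

theorem ysN_sorted (g : List (List Int)) (h w : Nat) :
    (ysN g h w).Pairwise (· < ·) := List.Pairwise.filter _ List.pairwise_lt_range

theorem ysN_nil_iff_xsN_nil (g : List (List Int)) (h w : Nat) :
    ysN g h w = [] ↔ xsN g h w = [] := by
  rw [ysN, xsN, List.filter_eq_nil_iff, List.flatMap_eq_nil_iff]
  constructor
  · intro hn y hy
    rw [List.filter_eq_nil_iff]
    intro x hx hc
    refine hn y hy ?_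
    simp only [rowNZ, List.any_eq_true]
    exact ⟨x, hx, hc⟩
  · intro hn y hy hr
    simp only [rowNZ, List.any_eq_true] at hr
    rcases hr with ⟨x, hx, hc⟩
    have := hn y hy
    rw [List.filter_eq_nil_iff] at this
    exact this x hx hc

theorem foldl_min_cast (L : List Nat) (a : Int) :
    L.foldl (fun b (y : Nat) => min b (y : Int)) a = (L.map Int.ofNat).foldl min a := by
  rw [List.foldl_map]; rfl

theorem foldl_max_cast (L : List Nat) (a : Int) :
    L.foldl (fun b (y : Nat) => max b (y : Int)) a = (L.map Int.ofNat).foldl max a := by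
  rw [List.foldl_map]; rfl

theorem minyA_cons (g : List (List Int)) (h w y0 : Nat) (yt : List Nat)
    (hys : ysN g h w = y0 :: yt) : minyA g h w = (y0 : Int) := by
  have hlt : y0 < h := mem_ysN_lt g h w y0 (by rw [hys]; simp)
  have hsort := ysN_sorted g h w
  rw [hys] at hsort
  rw [minyA, hys, List.foldl_cons, foldl_min_cast,
    min_eq_right (by exact_mod_cast le_of_lt hlt)]
  apply foldl_min_ge
  intro z hz
  rcases List.mem_map.mp hz with ⟨k, hk, rfl⟩
  simp only [Int.ofNat_eq_natCast]
  exact_mod_cast le_of_lt ((List.pairwise_cons.mp hsort).1 k hk)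

theorem maxyA_cons (g : List (List Int)) (h w y0 : Nat) (yt : List Nat)
    (hys : ysN g h w = y0 :: yt) :
    maxyA g h w = (((y0 :: yt).getLast (by simp) : Nat) : Int) := by
  have hne : ysN g h w ≠ [] := by rw [hys]; simp
  have hsp := (List.dropLast_concat_getLast hne)
  set m := (ysN g h w).getLast hne with hm
  have hsort := ysN_sorted g h w
  rw [← hsp] at hsort
  have hlast : ∀ z ∈ (ysN g h w).dropLast, z < m :=
    fun z hz => (List.pairwise_append.mp hsort).2.2 z hz m (by simp)
  have h1 : maxyA g h w = max ((ysN g h w).dropLast.foldl (fun a (y : Nat) => max a (y : Int)) 0) (m : Int) := by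
    rw [maxyA]
    conv_lhs => rw [← hsp]
    rw [List.foldl_append]
    rfl
  rw [h1, max_eq_right]
  · exact congrArg _ (List.getLast_congr _ _ hys)
  · rw [foldl_max_cast]
    apply foldl_max_le_of
    · positivity
    · intro z hz
      rcases List.mem_map.mp hz with ⟨k, hk, rfl⟩
      simp only [Int.ofNat_eq_natCast]
      exact_mod_cast le_of_lt (hlast k hk)

theorem minxA_cons (g : List (List Int)) (h w x0 : Nat) (xt : List Nat)
    (hxs : xsN g h w = x0 :: xt) :
    minxA g h w = (xt.map Int.ofNat).foldl min (x0 : Int) := by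
  have hlt : x0 < w := mem_xsN_lt g h w x0 (by rw [hxs]; simp)
  rw [minxA, hxs, List.foldl_cons, foldl_min_cast, foldl_min_init]
  apply min_eq_right
  calc (xt.map Int.ofNat).foldl min (x0 : Int) ≤ (x0 : Int) := foldl_min_le _ _
    _ ≤ (w : Int) := by exact_mod_cast le_of_lt hlt

theorem maxxA_cons (g : List (List Int)) (h w x0 : Nat) (xt : List Nat)
    (hxs : xsN g h w = x0 :: xt) :
    maxxA g h w = (xt.map Int.ofNat).foldl max (x0 : Int) := by
  rw [maxxA, hxs, List.foldl_cons, foldl_max_cast, foldl_max_init]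
  apply max_eq_right
  calc (0 : Int) ≤ (x0 : Int) := by positivity
    _ ≤ _ := (PySem.List.le_foldl_max _ _).1

theorem miny_le_maxy (g : List (List Int)) (h w y0 : Nat) (yt : List Nat)
    (hys : ysN g h w = y0 :: yt) : minyA g h w ≤ maxyA g h w := by
  rw [minyA_cons g h w y0 yt hys, maxyA_cons g h w y0 yt hys]
  have hmem : (y0 :: yt).getLast (by simp) ∈ y0 :: yt := List.getLast_mem _
  have hsort := ysN_sorted g h w
  rw [hys] at hsort
  rcases List.mem_cons.mp hmem with heq | hmem'
  · rw [heq]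
  · exact_mod_cast le_of_lt ((List.pairwise_cons.mp hsort).1 _ hmem')

theorem take_getD (l : List Int) (w x : Nat) (d : Int) (hx : x < w) :
    (l.take w).getD x d = l.getD x d := by
  by_cases hl : x < l.length
  · rw [List.getD_eq_getElem _ _ (by simp [hx, hl]), List.getD_eq_getElem _ _ hl]
    exact List.getElem_take
  · rw [List.getD_eq_getElem?_getD, List.getD_eq_getElem?_getD,
      List.getElem?_eq_none (by simp; omega), List.getElem?_eq_none (by omega)]

theorem take_any (r : List Int) (w : Nat) (hw : w ≤ r.length) :
    ((r.take w).any fun v => decide (v ≠ 0)) = (List.range w).any (fun x => decide (r.getD x 0 ≠ 0)) := by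
  rw [Bool.eq_iff_iff, List.any_eq_true, List.any_eq_true]
  constructor
  · rintro ⟨v, hv, hnz⟩
    rcases List.mem_iff_getElem.mp hv with ⟨i, hi, rfl⟩
    have hiw : i < w := by simp at hi; omega
    refine ⟨i, List.mem_range.mpr hiw, ?_⟩
    rwa [List.getD_eq_getElem _ _ (by omega), ← List.getElem_take (h := hi)]
  · rintro ⟨x, hx, hnz⟩
    have hxw : x < w := List.mem_range.mp hx
    refine ⟨(r.take w)[x]'(by simp; omega), List.getElem_mem _, ?_⟩
    rw [List.getElem_take]
    rwa [List.getD_eq_getElem _ _ (by omega)] at hnz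

theorem rowsB_getD (g : List (List Int)) (w y : Nat) (hy : y < g.length) :
    (rowsB g w).getD y [] = (g.getD y []).take w := by
  rw [rowsB, List.getD_eq_getElem _ _ (by simpa using hy), List.getD_eq_getElem _ _ hy,
    List.getElem_map]

theorem filterMap_enum_eq (r : List Int) :
    (PySem.List.enumerate r 0).filterMap (fun p => if p.2 ≠ 0 then some p.1 else none)
    = ((List.range r.length).filter (fun x => decide (r.getD x 0 ≠ 0))).map Int.ofNat := by
  rw [show PySem.List.enumerate r 0 = PySem.List.enumerate r from rfl,
    PySem.List.enumerate_eq_map_pyRange r 0, List.filterMap_map]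
  rw [show PySem.List.len r = (r.length : Int) by simp [PySem.List.len],
    pyRange_natCast, List.filterMap_map]
  simp only [Function.comp_def, PySem.List.pyGetD_natCast]
  rw [filterMap_ite]
  exact List.map_congr_left (fun a _ => by simp)

theorem flatMap_eq_range (l : List (List Int)) (f : List Int → List Int) :
    l.flatMap f = (List.range l.length).flatMap (fun i => f (l.getD i [])) := by
  induction l with
  | nil => simp
  | cons x t ih =>
    rw [List.flatMap_cons, List.length_cons, List.range_succ_eq_map, List.flatMap_cons,
      List.flatMap_map]
    simp only [List.getD_cons_zero, List.getD_cons_succ]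
    rw [ih]

theorem ysB_eq (g : List (List Int)) (h w : Nat) (hh : h = g.length)
    (hPre : ∀ r ∈ g, w ≤ r.length) :
    (PySem.List.enumerate (rowsB g w) 0).filterMap
      (fun p => if p.2.any (fun v => v ≠ 0) then some p.1 else none)
    = (ysN g h w).map Int.ofNat := by
  rw [show PySem.List.enumerate (rowsB g w) 0 = PySem.List.enumerate (rowsB g w) from rfl,
    PySem.List.enumerate_eq_map_pyRange (rowsB g w) [], List.filterMap_map]
  rw [show PySem.List.len (rowsB g w) = (h : Int) by simp [PySem.List.len, rowsB, hh],
    pyRange_natCast, List.filterMap_map]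
  simp only [Function.comp_def, PySem.List.pyGetD_natCast]
  rw [filterMap_ite, ysN]
  rw [List.filter_congr (q := rowNZ g w) ?_]
  · exact List.map_congr_left (fun a _ => by simp)
  · intro y hy
    have hyh : y < g.length := by rw [← hh]; exact List.mem_range.mp hy
    have hmem : g.getD y [] ∈ g := by
      rw [List.getD_eq_getElem _ _ hyh]; exact List.getElem_mem _
    show decide _ = _
    rw [Bool.decide_eq_true, rowsB_getD g w y hyh, take_any _ _ (hPre _ hmem)]
    rfl

theorem xsB_eq (g : List (List Int)) (h w : Nat) (hh : h = g.length)
    (hPre : ∀ r ∈ g, w ≤ r.length) :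
    (rowsB g w).flatMap (fun r =>
      (PySem.List.enumerate r 0).filterMap (fun p => if p.2 ≠ 0 then some p.1 else none))
    = (xsN g h w).map Int.ofNat := by
  rw [flatMap_eq_range]
  have hlen : (rowsB g w).length = h := by simp [rowsB, hh]
  rw [hlen]
  have hcongr : ∀ y ∈ List.range h,
      (PySem.List.enumerate ((rowsB g w).getD y []) 0).filterMap
        (fun p => if p.2 ≠ 0 then some p.1 else none)
      = ((List.range w).filter (fun x => decide (cellN g y x ≠ 0))).map Int.ofNat := by
    intro y hy
    have hyh : y < g.length := by rw [← hh]; exact List.mem_range.mp hy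
    have hmem : g.getD y [] ∈ g := by
      rw [List.getD_eq_getElem _ _ hyh]; exact List.getElem_mem _
    have hwl : w ≤ (g.getD y []).length := hPre _ hmem
    have hrl : ((g.getD y []).take w).length = w := by rw [List.length_take]; omega
    rw [rowsB_getD g w y hyh, filterMap_enum_eq, hrl]
    congr 1
    apply List.filter_congr
    intro x hx
    rw [take_getD _ _ _ _ (List.mem_range.mp hx)]
    rfl
  calc (List.range h).flatMap (fun i => (PySem.List.enumerate ((rowsB g w).getD i []) 0).filterMap
        (fun p => if p.2 ≠ 0 then some p.1 else none))
      = (List.range h).flatMap (fun y => ((List.range w).filter (fun x => decide (cellN g y x ≠ 0))).map Int.ofNat) := by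
        rw [List.flatMap_def, List.map_congr_left (fun a ha => hcongr a ha), ← List.flatMap_def]
    _ = (xsN g h w).map Int.ofNat := (List.map_flatMap).symm

def innerStep (g : List (List Int)) (h w : Nat) (dy dx : Int) (y : Nat)
    (res : List (List Int)) (x : Nat) : List (List Int) :=
  if pyCell g (y : Int) (x : Int) ≠ 0 then
    if 0 ≤ (y : Int) + dy ∧ (y : Int) + dy < (h : Int) ∧ 0 ≤ (x : Int) + dx ∧ (x : Int) + dx < (w : Int) then
      res.set ((y : Int) + dy).toNat
        ((res.getD ((y : Int) + dy).toNat []).set ((x : Int) + dx).toNat (pyCell g (y : Int) (x : Int)))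
    else res
  else res

def rowStep (g : List (List Int)) (w : Nat) (dx : Int) (y : Nat) (row : List Int) (x : Nat) : List Int :=
  if cellN g y x ≠ 0 ∧ 0 ≤ (x : Int) + dx ∧ (x : Int) + dx < (w : Int) then
    row.set ((x : Int) + dx).toNat (cellN g y x)
  else row

theorem translate_eq_loop (row0 : List Int) (rest : List (List Int)) (hr : row0 ≠ []) (dy dx : Int) :
    translate_grid (row0 :: rest) dy dx
    = (List.range (row0 :: rest).length).foldl
        (fun res y => (List.range row0.length).foldl
          (innerStep (row0 :: rest) (row0 :: rest).length row0.length dy dx y) res)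
        (List.replicate (row0 :: rest).length (zrow row0.length)) := by
  show (if row0 = [] then _ else _) = _
  rw [if_neg hr]
  simp only [pyRange_natCast, List.foldl_map]
  rfl

theorem set_map_range {α : Type} (w t : Nat) (f : Nat → α) (v : α) (_ht : t < w) :
    ((List.range w).map f).set t v = (List.range w).map (fun j => if j = t then v else f j) := by
  apply List.ext_getElem (by simp)
  intro i h1 h2
  simp only [List.getElem_set, List.getElem_map, List.getElem_range]
  by_cases hit : i = t
  · simp [hit]
  · simp [hit, Ne.symm hit]

theorem inner_out (g : List (List Int)) (h w : Nat) (dy dx : Int) (y : Nat)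
    (hout : ¬(0 ≤ (y : Int) + dy ∧ (y : Int) + dy < (h : Int))) (L : List Nat)
    (res : List (List Int)) :
    L.foldl (innerStep g h w dy dx y) res = res := by
  induction L generalizing res with
  | nil => rfl
  | cons x t ih =>
    have hstep : innerStep g h w dy dx y res x = res := by
      rw [innerStep]
      split_ifs with h1 h2
      · exact absurd ⟨h2.1, h2.2.1⟩ hout
      · rfl
      · rfl
    rw [List.foldl_cons, hstep, ih]

theorem inner_lift (g : List (List Int)) (h w : Nat) (dy dx : Int) (y : Nat)
    (hin1 : 0 ≤ (y : Int) + dy) (hin2 : (y : Int) + dy < (h : Int)) (L : List Nat)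
    (res : List (List Int)) (hres : res.length = h) :
    L.foldl (innerStep g h w dy dx y) res
    = res.set ((y : Int) + dy).toNat
        (L.foldl (rowStep g w dx y) (res.getD ((y : Int) + dy).toNat [])) := by
  set t := ((y : Int) + dy).toNat 
  have hth : t < h := by omega
  induction L generalizing res with
  | nil =>
    rw [List.foldl_nil, List.foldl_nil, List.getD_eq_getElem _ _ (by omega),
      List.set_getElem_self]
  | cons x L ih =>
    rw [List.foldl_cons, List.foldl_cons]
    by_cases hc : cellN g y x ≠ 0
    · by_cases hx : 0 ≤ (x : Int) + dx ∧ (x : Int) + dx < (w : Int)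
      · have hstep : innerStep g h w dy dx y res x
            = res.set t ((res.getD t []).set ((x : Int) + dx).toNat (cellN g y x)) := by
          rw [innerStep, pyCell_natCast, if_pos hc, if_pos ⟨hin1, hin2, hx.1, hx.2⟩]
        rw [hstep, ih _ (by simp [hres])]
        rw [List.set_set]
        congr 1
        have : (res.set t ((res.getD t []).set ((x : Int) + dx).toNat (cellN g y x))).getD t []
            = (res.getD t []).set ((x : Int) + dx).toNat (cellN g y x) := by
          rw [List.getD_eq_getElem _ _ (by simp; omega), List.getElem_set, if_pos rfl]
        rw [this]
        congr 1
        rw [rowStep, if_pos ⟨hc, hx⟩]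
      · have hstep : innerStep g h w dy dx y res x = res := by
          rw [innerStep, pyCell_natCast, if_pos hc, if_neg (by tauto)]
        have hrow : rowStep g w dx y (res.getD t []) x = res.getD t [] := by
          rw [rowStep, if_neg (by tauto)]
        rw [hstep, hrow, ih _ hres]
    · have hstep : innerStep g h w dy dx y res x = res := by
        rw [innerStep, pyCell_natCast, if_neg hc]
      have hrow : rowStep g w dx y (res.getD t []) x = res.getD t [] := by
        rw [rowStep, if_neg (by tauto)]
      rw [hstep, hrow, ih _ hres]

theorem row_loop (g : List (List Int)) (w : Nat) (dx : Int) (y : Nat) (k : Nat) (hk : k ≤ w) :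
    (List.range k).foldl (rowStep g w dx y) (zrow w)
    = (List.range w).map (fun (j : Nat) => if 0 ≤ (j : Int) - dx ∧ (j : Int) - dx < (k : Int)
        then cellN g y ((j : Int) - dx).toNat else 0) := by
  induction k with
  | zero =>
    rw [List.range_zero, List.foldl_nil, zrow]
    apply List.ext_getElem (by simp)
    intro i h1 h2
    simp only [List.getElem_replicate, List.getElem_map, List.getElem_range]
    rw [if_neg (by omega)]
  | succ k ih =>
    rw [List.range_succ, List.foldl_append, ih (by omega), List.foldl_cons, List.foldl_nil]
    by_cases hc : cellN g y k ≠ 0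
    · by_cases hx : 0 ≤ (k : Int) + dx ∧ (k : Int) + dx < (w : Int)
      · rw [rowStep, if_pos ⟨hc, hx⟩, set_map_range _ _ _ _ (by omega)]
        apply List.map_congr_left
        intro j hj
        have hjw : j < w := List.mem_range.mp hj
        by_cases hjt : j = ((k : Int) + dx).toNat
        · rw [if_pos hjt, if_pos (by omega)]
          congr 1
          omega
        · rw [if_neg hjt]
          by_cases hcond : 0 ≤ (j : Int) - dx ∧ (j : Int) - dx < (k : Int)
          · rw [if_pos hcond, if_pos ⟨hcond.1, by omega⟩]
          · rw [if_neg hcond, if_neg (by omega)]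
      · rw [rowStep, if_neg (by tauto)]
        apply List.map_congr_left
        intro j hj
        have hjw : j < w := List.mem_range.mp hj
        by_cases hcond : 0 ≤ (j : Int) - dx ∧ (j : Int) - dx < (k : Int)
        · rw [if_pos hcond, if_pos ⟨hcond.1, by omega⟩]
        · rw [if_neg hcond, if_neg (by omega)]
    · rw [rowStep, if_neg (by tauto)]
      simp only [ne_eq, not_not] at hc
      apply List.map_congr_left
      intro j hj
      have hjw : j < w := List.mem_range.mp hj
      by_cases hcond : 0 ≤ (j : Int) - dx ∧ (j : Int) - dx < (k : Int)
      · rw [if_pos hcond, if_pos ⟨hcond.1, by omega⟩]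
      · rw [if_neg hcond]
        by_cases hcond2 : 0 ≤ (j : Int) - dx ∧ (j : Int) - dx < (((k + 1 : Nat)) : Int)
        · rw [if_pos hcond2]
          have : ((j : Int) - dx).toNat = k := by
            have := hcond2.1; have := hcond2.2
            push_cast at *
            omega
          rw [this, hc]
        · rw [if_neg hcond2]

theorem outer_loop (g : List (List Int)) (h w : Nat) (dy dx : Int) (k : Nat) (hk : k ≤ h) :
    (List.range k).foldl (fun res y => (List.range w).foldl (innerStep g h w dy dx y) res)
      (List.replicate h (zrow w))
    = (List.range h).map (fun (i : Nat) => if 0 ≤ (i : Int) - dy ∧ (i : Int) - dy < (k : Int)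
        then trRow g w dx (((i : Int) - dy).toNat) else zrow w) := by
  induction k with
  | zero =>
    rw [List.range_zero, List.foldl_nil]
    apply List.ext_getElem (by simp)
    intro i h1 h2
    simp only [List.getElem_replicate, List.getElem_map, List.getElem_range]
    rw [if_neg (by omega)]
  | succ k ih =>
    rw [List.range_succ, List.foldl_append, ih (by omega), List.foldl_cons, List.foldl_nil]
    by_cases hin : 0 ≤ (k : Int) + dy ∧ (k : Int) + dy < (h : Int)
    · rw [inner_lift g h w dy dx k hin.1 hin.2 _ _ (by simp)]
      have hget : (((List.range h).map (fun (i : Nat) => if 0 ≤ (i : Int) - dy ∧ (i : Int) - dy < (k : Int)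
          then trRow g w dx (((i : Int) - dy).toNat) else zrow w)).getD (((k : Int) + dy).toNat) [])
          = zrow w := by
        rw [List.getD_eq_getElem _ _ (by simp; omega), List.getElem_map, List.getElem_range,
          if_neg (by omega)]
      rw [hget, row_loop g w dx k w (le_refl w), set_map_range _ _ _ _ (by omega)]
      apply List.map_congr_left
      intro i hi
      have hih : i < h := List.mem_range.mp hi
      by_cases hit : i = ((k : Int) + dy).toNat
      · rw [if_pos hit, if_pos (by omega)]
        have : (((i : Int) - dy).toNat) = k := by omega
        rw [this, trRow]
      · rw [if_neg hit]
        by_cases hcond : 0 ≤ (i : Int) - dy ∧ (i : Int) - dy < (k : Int)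
        · rw [if_pos hcond, if_pos ⟨hcond.1, by omega⟩]
        · rw [if_neg hcond, if_neg (by omega)]
    · rw [inner_out g h w dy dx k hin]
      apply List.map_congr_left
      intro i hi
      have hih : i < h := List.mem_range.mp hi
      by_cases hcond : 0 ≤ (i : Int) - dy ∧ (i : Int) - dy < (k : Int)
      · rw [if_pos hcond, if_pos ⟨hcond.1, by omega⟩]
      · rw [if_neg hcond, if_neg (by omega)]

theorem translate_spec (row0 : List Int) (rest : List (List Int)) (hr : row0 ≠ []) (dy dx : Int) :
    translate_grid (row0 :: rest) dy dx
    = trGrid (row0 :: rest) (row0 :: rest).length row0.length dy dx := by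
  rw [translate_eq_loop row0 rest hr dy dx, outer_loop _ _ _ _ _ _ (le_refl _), trGrid]

theorem rowsB_len (g : List (List Int)) (w : Nat) : (rowsB g w).length = g.length := by
  simp [rowsB]

theorem rowsB_getElem (g : List (List Int)) (w i : Nat) (hi : i < g.length) :
    (rowsB g w)[i]'(by rw [rowsB_len]; exact hi) = (g[i]'hi).take w := by
  simp [rowsB]

theorem mem_of_lt (g : List (List Int)) (y : Nat) (hy : y < g.length) : g.getD y [] ∈ g := by
  rw [List.getD_eq_getElem _ _ hy]; exact List.getElem_mem _

theorem len_take_w (g : List (List Int)) (w y : Nat) (hPre : ∀ r ∈ g, w ≤ r.length)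
    (hy : y < g.length) : ((g.getD y []).take w).length = w := by
  have := hPre _ (mem_of_lt g y hy)
  rw [List.length_take]; omega

theorem trRow_zero (g : List (List Int)) (w y : Nat) (hPre : ∀ r ∈ g, w ≤ r.length)
    (hy : y < g.length) : trRow g w 0 y = (g.getD y []).take w := by
  apply List.ext_getElem (by rw [len_take_w g w y hPre hy]; simp [trRow])
  intro j h1 h2
  have hjw : j < w := by simpa [trRow] using h1
  simp only [trRow]
  simp only [List.getElem_map, List.getElem_range]
  rw [if_pos (by refine ⟨by omega, by push_cast; omega⟩)]
  have h3 : j < (g.getD y []).length := by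
    have := hPre _ (mem_of_lt g y hy); omega
  have hjn : ((j : Int) - 0).toNat = j := by omega
  rw [hjn]
  show (g.getD y []).getD j 0 = _
  rw [List.getD_eq_getElem _ _ h3]
  exact (List.getElem_take).symm

theorem top_eq (g : List (List Int)) (w k : Nat) (hPre : ∀ r ∈ g, w ≤ r.length)
    (hk : k < g.length) :
    trGrid g g.length w (-(k : Int)) 0
    = (rowsB g w).drop k ++ List.replicate k (zrow w) := by
  apply List.ext_getElem (by simp [trGrid, rowsB]; omega)
  intro i h1 h2
  have hih : i < g.length := by simpa [trGrid] using h1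
  simp only [trGrid]
  simp only [List.getElem_map, List.getElem_range]
  rw [List.getElem_append]
  by_cases hcase : i < ((rowsB g w).drop k).length
  · have hikh : i + k < g.length := by
      rw [List.length_drop, rowsB_len] at hcase; omega
    rw [dif_pos hcase, if_pos (by refine ⟨by omega, by push_cast; omega⟩)]
    rw [List.getElem_drop]
    have h3 : k + i < g.length := by omega
    rw [rowsB_getElem g w (k + i) h3]
    have : ((i : Int) - -(k : Int)).toNat = k + i := by omega
    rw [this, trRow_zero g w (k + i) hPre h3, List.getD_eq_getElem _ _ h3]
  · have hikh : ¬(i + k < g.length) := by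
      rw [List.length_drop, rowsB_len] at hcase; omega
    rw [dif_neg hcase, if_neg (by push_cast; omega), List.getElem_replicate]

theorem bottom_eq (g : List (List Int)) (w d : Nat) (hPre : ∀ r ∈ g, w ≤ r.length)
    (hd : d < g.length) :
    trGrid g g.length w (d : Int) 0
    = List.replicate d (zrow w) ++ (rowsB g w).take (g.length - d) := by
  apply List.ext_getElem (by simp [trGrid, rowsB]; omega)
  intro i h1 h2
  have hih : i < g.length := by simpa [trGrid] using h1
  simp only [trGrid]
  simp only [List.getElem_map, List.getElem_range]
  rw [List.getElem_append]
  by_cases hcase : i < (List.replicate d (zrow w)).length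
  · have hid : i < d := by simpa using hcase
    rw [dif_pos hcase, if_neg (by push_cast; omega), List.getElem_replicate]
  · have hid : ¬(i < d) := by simpa using hcase
    rw [dif_neg hcase, if_pos (by refine ⟨by omega, by push_cast; omega⟩)]
    simp only [List.length_replicate, List.getElem_take]
    have h3 : i - d < g.length := by omega
    rw [rowsB_getElem g w (i - d) h3]
    have : ((i : Int) - (d : Int)).toNat = i - d := by omega
    rw [this, trRow_zero g w (i - d) hPre h3, List.getD_eq_getElem _ _ h3]

theorem left_row_eq (g : List (List Int)) (w d y : Nat) (hPre : ∀ r ∈ g, w ≤ r.length)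
    (hy : y < g.length) (hd : d < w) :
    trRow g w (-(d : Int)) y
    = ((g.getD y []).take w).drop d ++ List.replicate d 0 := by
  have hwl := hPre _ (mem_of_lt g y hy)
  have hlw := len_take_w g w y hPre hy
  apply List.ext_getElem
    (by simp only [trRow, List.length_map, List.length_range, List.length_append,
          List.length_drop, List.length_replicate, List.length_take, hlw]; omega)
  intro j h1 h2
  have hjw : j < w := by simpa [trRow] using h1
  simp only [trRow]
  simp only [List.getElem_map, List.getElem_range]
  rw [List.getElem_append]
  by_cases hcase : j < (((g.getD y []).take w).drop d).length
  · have hjd : j + d < w := by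
      rw [List.length_drop, len_take_w g w y hPre hy] at hcase; omega
    rw [dif_pos hcase, if_pos (by refine ⟨by omega, by push_cast; omega⟩)]
    simp only [List.getElem_drop, List.getElem_take]
    have hjn : ((j : Int) - -(d : Int)).toNat = d + j := by omega
    rw [hjn]
    show (g.getD y []).getD (d + j) 0 = _
    rw [List.getD_eq_getElem _ _ (by omega)]
  · have hjd : ¬(j + d < w) := by
      rw [List.length_drop, len_take_w g w y hPre hy] at hcase; omega
    rw [dif_neg hcase, if_neg (by push_cast; omega), List.getElem_replicate]

theorem right_row_eq (g : List (List Int)) (w d y : Nat) (hPre : ∀ r ∈ g, w ≤ r.length)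
    (hy : y < g.length) (hd : d < w) :
    trRow g w (d : Int) y
    = List.replicate d 0 ++ ((g.getD y []).take w).take (w - d) := by
  have hwl := hPre _ (mem_of_lt g y hy)
  have hlw := len_take_w g w y hPre hy
  apply List.ext_getElem
    (by simp only [trRow, List.length_map, List.length_range, List.length_append,
          List.length_drop, List.length_replicate, List.length_take, hlw]; omega)
  intro j h1 h2
  have hjw : j < w := by simpa [trRow] using h1
  simp only [trRow]
  simp only [List.getElem_map, List.getElem_range]
  rw [List.getElem_append]
  by_cases hcase : j < (List.replicate d (0 : Int)).length
  · have hjd : j < d := by simpa using hcase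
    rw [dif_pos hcase, if_neg (by push_cast; omega), List.getElem_replicate]
  · have hjd : ¬(j < d) := by simpa using hcase
    rw [dif_neg hcase, if_pos (by refine ⟨by omega, by push_cast; omega⟩)]
    simp only [List.length_replicate, List.getElem_take]
    have hjn : ((j : Int) - (d : Int)).toNat = j - d := by omega
    rw [hjn]
    show (g.getD y []).getD (j - d) 0 = _
    rw [List.getD_eq_getElem _ _ (by omega)]

theorem left_eq (g : List (List Int)) (w d : Nat) (hPre : ∀ r ∈ g, w ≤ r.length) (hd : d < w) :
    trGrid g g.length w 0 (-(d : Int))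
    = (rowsB g w).map (fun r => r.drop d ++ List.replicate d 0) := by
  apply List.ext_getElem (by simp [trGrid, rowsB])
  intro i h1 h2
  have hih : i < g.length := by simpa [trGrid] using h1
  simp only [trGrid]
  simp only [List.getElem_map, List.getElem_range]
  rw [if_pos (by refine ⟨by omega, by push_cast; omega⟩)]
  rw [rowsB_getElem g w i hih]
  have : ((i : Int) - 0).toNat = i := by omega
  rw [this, left_row_eq g w d i hPre hih hd, List.getD_eq_getElem _ _ hih]

theorem right_eq (g : List (List Int)) (w d : Nat) (hPre : ∀ r ∈ g, w ≤ r.length) (hd : d < w) :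
    trGrid g g.length w 0 (d : Int)
    = (rowsB g w).map (fun r => List.replicate d 0 ++ r.take (w - d)) := by
  apply List.ext_getElem (by simp [trGrid, rowsB])
  intro i h1 h2
  have hih : i < g.length := by simpa [trGrid] using h1
  simp only [trGrid]
  simp only [List.getElem_map, List.getElem_range]
  rw [if_pos (by refine ⟨by omega, by push_cast; omega⟩)]
  rw [rowsB_getElem g w i hih]
  have : ((i : Int) - 0).toNat = i := by omega
  rw [this, right_row_eq g w d i hPre hih hd, List.getD_eq_getElem _ _ hih]

theorem foldl_min_nonneg (L : List Int) (a : Int) (ha : 0 ≤ a) (h : ∀ z ∈ L, 0 ≤ z) :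
    0 ≤ L.foldl min a := by
  induction L generalizing a with
  | nil => exact ha
  | cons x t ih =>
    exact ih (min a x) (le_min ha (h x (by simp))) (fun z hz => h z (by simp [hz]))

theorem getLast_map_int (L : List Nat) (hL : L ≠ []) (f : Nat → Int) :
    (L.map f).getLast (by simpa) = f (L.getLast hL) := by
  rw [List.getLast_eq_getElem, List.getLast_eq_getElem, List.getElem_map]
  congr 1
  simp

theorem minyA_nil (g : List (List Int)) (h w : Nat) (hn : ysN g h w = []) :
    minyA g h w = (h : Int) := by rw [minyA, hn]; rfl

theorem maxyA_nil (g : List (List Int)) (h w : Nat) (hn : ysN g h w = []) :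
    maxyA g h w = 0 := by rw [maxyA, hn]; rfl

-- ===== VERDICT (by name: the statement is the Claim_ definition above) =====
theorem align_to_edge_spec : Claim_equal_align_to_edge := by
  unfold Claim_equal_align_to_edge
  intro grid edge hDom hPre
  unfold Spec_align_to_edge
  cases grid with
  | nil => rfl
  | cons row0 rest =>
    by_cases hr0 : row0 = []
    · simp only [align_to_edge, align_to_edge_alt, if_pos hr0]
    · have hPre' : ∀ r ∈ (row0 :: rest), row0.length ≤ r.length := by
        intro r hr
        have := hPre r hr
        simpa using this
      simp only [align_to_edge, align_to_edge_alt, if_neg hr0]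
      rw [bb_fold_eq (row0 :: rest) (row0 :: rest).length row0.length]
      rw [show (row0 :: rest).map (fun r => r.take row0.length)
            = rowsB (row0 :: rest) row0.length from rfl]
      rw [ysB_eq (row0 :: rest) (row0 :: rest).length row0.length rfl hPre']
      rw [xsB_eq (row0 :: rest) (row0 :: rest).length row0.length rfl hPre']
      dsimp only
      rcases hys : ysN (row0 :: rest) (row0 :: rest).length row0.length with _ | ⟨y0, yt⟩
      · -- no nonzero cell: A returns grid, B returns a copy on every path
        have hxs := (ysN_nil_iff_xsN_nil _ _ _).mp hys
        rw [hxs, minyA_nil _ _ _ hys, maxyA_nil _ _ _ hys]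
        rw [if_pos (by exact_mod_cast Nat.succ_pos rest.length)]
        simp
      · have hmin := minyA_cons _ _ _ _ _ hys
        have hmax := maxyA_cons _ _ _ _ _ hys
        rw [if_neg (by have := miny_le_maxy _ _ _ _ _ hys; omega)]
        simp only [List.map_cons]
        have hy0h : y0 < (row0 :: rest).length := mem_ysN_lt _ _ _ _ (by rw [hys]; simp)
        by_cases htop : edge = "top"
        · rw [if_pos htop, if_pos (Or.inl htop), if_pos htop, hmin]
          rw [translate_spec row0 rest hr0, top_eq _ _ _ hPre' hy0h]
          simp [zrow]
        · rw [if_neg htop]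
          by_cases hbot : edge = "bottom"
          · rw [if_pos hbot, if_pos (Or.inr hbot), if_neg htop, hmax]
            set m : Nat := (y0 :: yt).getLast (by simp) with hm
            have hmh : m < (row0 :: rest).length :=
              mem_ysN_lt _ _ _ _ (by rw [hys, hm]; exact List.getLast_mem _)
            have hdint : (((row0 :: rest).length : Int) - 1 - (m : Int))
                = (((row0 :: rest).length - 1 - m : Nat) : Int) := by
              simp only [List.length_cons] at hmh ⊢
              omega
            rw [hdint, translate_spec row0 rest hr0,
              bottom_eq _ _ _ hPre' (by simp only [List.length_cons] at hmh ⊢; omega)]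
            have hgl := getLast_map_int (y0 :: yt) (by simp) Int.ofNat
            simp only [List.map_cons] at hgl
            rw [hgl, ← hm]
            have : ((((row0 :: rest).length : Int)) - 1 - Int.ofNat m).toNat
                = (row0 :: rest).length - 1 - m := by
              simp only [Int.ofNat_eq_natCast, List.length_cons] at hmh ⊢
              omega
            rw [this]
            simp [zrow]
          · rw [if_neg hbot,
              if_neg (show ¬(edge = "top" ∨ edge = "bottom") from by tauto)]
            rcases hxs : xsN (row0 :: rest) (row0 :: rest).length row0.length with _ | ⟨x0, xt⟩
            · exact absurd ((ysN_nil_iff_xsN_nil _ _ _).mpr hxs) (by rw [hys]; simp)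
            · simp only [List.map_cons]
              have hminx := minxA_cons _ _ _ _ _ hxs
              have hmaxx := maxxA_cons _ _ _ _ _ hxs
              have hx0w : x0 < row0.length := mem_xsN_lt _ _ _ _ (by rw [hxs]; simp)
              have hxmem : ∀ k ∈ xt, k < row0.length := by
                intro k hk
                exact mem_xsN_lt _ _ _ _ (by rw [hxs]; simp [hk])
              by_cases hleft : edge = "left"
              · rw [if_pos hleft, if_pos (Or.inl hleft), if_pos hleft, hminx]
                set mI : Int := (xt.map Int.ofNat).foldl min (x0 : Int) with hmI
                have hnn : 0 ≤ mI := by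
                  rw [hmI]
                  apply foldl_min_nonneg _ _ (by positivity)
                  intro z hz
                  rcases List.mem_map.mp hz with ⟨k, _, rfl⟩
                  simp [Int.ofNat_eq_natCast]
                have hle : mI ≤ (x0 : Int) := foldl_min_le _ _
                have hdw : mI.toNat < row0.length := by omega
                have hcast : -mI = -((mI.toNat : Nat) : Int) := by omega
                rw [hcast, translate_spec row0 rest hr0, left_eq _ _ _ hPre' hdw]
                rfl
              · rw [if_neg hleft]
                by_cases hright : edge = "right"
                · rw [if_pos hright, if_pos (Or.inr hright), if_neg hleft, hmaxx]
                  set mX : Int := (xt.map Int.ofNat).foldl max (x0 : Int) with hmX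
                  have hx0X : (x0 : Int) ≤ mX := (PySem.List.le_foldl_max _ _).1
                  have hXw : mX ≤ (row0.length : Int) - 1 := by
                    rw [hmX]
                    apply foldl_max_le_of
                    · omega
                    · intro z hz
                      rcases List.mem_map.mp hz with ⟨k, hk, rfl⟩
                      have := hxmem k hk
                      simp only [Int.ofNat_eq_natCast]
                      omega
                  have hnnX : 0 ≤ mX := le_trans (by positivity) hx0X
                  set dI : Int := (row0.length : Int) - 1 - mX with hdI
                  have hdw : dI.toNat < row0.length := by omega
                  have hcast : dI = ((dI.toNat : Nat) : Int) := by omega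
                  rw [hcast, translate_spec row0 rest hr0, right_eq _ _ _ hPre' hdw]
                  rfl
                · rw [if_neg hright,
                    if_neg (show ¬(edge = "left" ∨ edge = "right") from by tauto)]
                  simp
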